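-- pv_equiv track=rewrite | github.com/raozeng/6mAPred-MSFF | 6mAPred_MS.py | calculate_K1_K3
-- ===== SOURCE A (Python) =====
-- def calculate_K1_K3(sequence):
--     X = []
--     dictNum = {'A' : 1, 'T' : 2, 'C' : 3, 'G' : 4}
--     for s in sequence:
--         X.append(dictNum[s])
--
--     dictNum3 = { 'AAA':1, 'AAC':2, 'AAG':3, 'AAT':4, 'ACA':5, 'ACC':6, 'ACG':7, 'ACT':8, 'AGA':9,
--             'AGC':10, 'AGG':11, 'AGT':12, 'ATA':13, 'ATC':14, 'ATG':15, 'ATT':16,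
--             'CAA':17, 'CAC':18, 'CAG':19, 'CAT':20, 'CCA':21, 'CCC':22, 'CCG':23, 'CCT':24, 'CGA':25,
--             'CGC':26, 'CGG':27, 'CGT':28, 'CTA':29, 'CTC':30, 'CTG':31, 'CTT':32,
--             'GAA':33, 'GAC':34, 'GAG':35, 'GAT':36, 'GCA':37, 'GCC':38, 'GCG':39, 'GCT':40, 'GGA':41,
--             'GGC':42, 'GGG':43, 'GGT':44, 'GTA':45, 'GTC':46, 'GTG':47, 'GTT':48,
--             'TAA':49, 'TAC':50, 'TAG':51, 'TAT':52, 'TCA':53, 'TCC':54, 'TCG':55, 'TCT':56, 'TGA':57,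
--             'TGC':58, 'TGG':59, 'TGT':60, 'TTA':61, 'TTC':62, 'TTG':63, 'TTT':64}
--
--     for index in range(len(sequence)-2):
--         X.append(dictNum3["".join(sequence[index:index+3])])
--
--     return X
-- ===== SOURCE B (Python) =====
-- def calculate_K1_K3(sequence):
--     num = {'A': 1, 'T': 2, 'C': 3, 'G': 4}
--     digit = {'A': 0, 'C': 1, 'G': 2, 'T': 3}
--     X = [num[s] for s in sequence]
--     X += [16 * digit[a] + 4 * digit[b] + digit[c] + 1
--           for a, b, c in zip(sequence, sequence[1:], sequence[2:])]
--     return X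
-- ===== Notes on version B (the rewrite author's own statement) =====
-- stated objective: simpler
-- what changed: The 64-entry trigram lookup table is replaced by a base-4 closed form (16*d[s0]+4*d[s1]+d[s2]+1 with A=0,C=1,G=2,T=3) computed over zipped 3-character windows instead of an index loop, and the appends become comprehensions.
import Mathlib
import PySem

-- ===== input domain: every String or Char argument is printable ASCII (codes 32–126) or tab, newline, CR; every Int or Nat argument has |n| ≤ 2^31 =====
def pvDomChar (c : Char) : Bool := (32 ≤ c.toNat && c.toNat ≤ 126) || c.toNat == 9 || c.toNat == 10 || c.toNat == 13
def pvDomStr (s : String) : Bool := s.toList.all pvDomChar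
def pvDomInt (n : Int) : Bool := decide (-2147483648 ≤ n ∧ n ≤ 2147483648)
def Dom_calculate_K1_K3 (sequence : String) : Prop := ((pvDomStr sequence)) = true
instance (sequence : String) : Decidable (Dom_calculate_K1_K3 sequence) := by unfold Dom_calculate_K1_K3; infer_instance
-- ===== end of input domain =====

-- B replaces A's 64-entry trigram table by a base-4 closed form over zipped 3-char windows (objective: simpler).

-- ===== PORT A =====
-- A's dict lookups raise KeyError on characters outside ACGT; those inputs are excluded by
-- Pre_calculate_K1_K3, so the getD default 0 is never reached on admitted inputs.
def pvDictNum : PySem.Dict Char Int := PySem.Dict.ofList [('A', 1), ('T', 2), ('C', 3), ('G', 4)]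

def pvList3 : List (String × Int) := [("AAA", 1), ("AAC", 2), ("AAG", 3), ("AAT", 4), ("ACA", 5), ("ACC", 6), ("ACG", 7), ("ACT", 8), ("AGA", 9), ("AGC", 10), ("AGG", 11), ("AGT", 12), ("ATA", 13), ("ATC", 14), ("ATG", 15), ("ATT", 16), ("CAA", 17), ("CAC", 18), ("CAG", 19), ("CAT", 20), ("CCA", 21), ("CCC", 22), ("CCG", 23), ("CCT", 24), ("CGA", 25), ("CGC", 26), ("CGG", 27), ("CGT", 28), ("CTA", 29), ("CTC", 30), ("CTG", 31), ("CTT", 32), ("GAA", 33), ("GAC", 34), ("GAG", 35), ("GAT", 36), ("GCA", 37), ("GCC", 38), ("GCG", 39), ("GCT", 40), ("GGA", 41), ("GGC", 42), ("GGG", 43), ("GGT", 44), ("GTA", 45), ("GTC", 46), ("GTG", 47), ("GTT", 48), ("TAA", 49), ("TAC", 50), ("TAG", 51), ("TAT", 52), ("TCA", 53), ("TCC", 54), ("TCG", 55), ("TCT", 56), ("TGA", 57), ("TGC", 58), ("TGG", 59), ("TGT", 60), ("TTA", 61), ("TTC", 62), ("TTG", 63), ("TTT", 64)]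

def pvDictNum3 : PySem.Dict String Int := PySem.Dict.ofList pvList3

def calculate_K1_K3 (sequence : String) : List Int :=
  let l := sequence.toList
  let X1 := l.foldl (fun X s => X ++ [PySem.Dict.getD pvDictNum s 0]) []
  -- for index in range(len(sequence)-2): X.append(dictNum3["".join(sequence[index:index+3])])
  (List.range (l.length - 2)).foldl
    (fun X (index : Nat) =>
      X ++ [PySem.Dict.getD pvDictNum3
              (String.ofList (PySem.List.slice l (some (index : Int)) (some ((index : Int) + 3)))) 0])
    X1

-- ===== PORT B =====
-- B's dict lookups also raise KeyError outside ACGT; default 0 unreached under Pre_.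
def pvNum (c : Char) : Int :=
  if c = 'A' then 1 else if c = 'T' then 2 else if c = 'C' then 3 else if c = 'G' then 4 else 0

def pvDigit (c : Char) : Int :=
  if c = 'A' then 0 else if c = 'C' then 1 else if c = 'G' then 2 else if c = 'T' then 3 else 0

def calculate_K1_K3_alt (sequence : String) : List Int :=
  let l := sequence.toList
  l.map pvNum ++
    ((l.zip (l.drop 1)).zip (l.drop 2)).map
      (fun p => 16 * pvDigit p.1.1 + 4 * pvDigit p.1.2 + pvDigit p.2 + 1)

-- ===== PRECONDITION & SPEC =====
-- Pre_ excludes exactly the strings with a character outside ACGT, on which A raises KeyError.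
def Pre_calculate_K1_K3 (sequence : String) : Prop :=
  sequence.toList.all (fun c => c == 'A' || c == 'T' || c == 'C' || c == 'G') = true
instance (sequence : String) : Decidable (Pre_calculate_K1_K3 sequence) := by
  unfold Pre_calculate_K1_K3; infer_instance

def pvWitness_calculate_K1_K3 : String := "ACGTA"

def Spec_calculate_K1_K3 (sequence : String) (out : List Int) : Prop := out = calculate_K1_K3_alt sequence
instance (sequence : String) (out : List Int) : Decidable (Spec_calculate_K1_K3 sequence out) := by unfold Spec_calculate_K1_K3; infer_instance

-- ===== CLAIM (what is proved, stated in full; the proofs are below) =====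
def Claim_equal_calculate_K1_K3 : Prop := ∀ (sequence : String), Dom_calculate_K1_K3 sequence → Pre_calculate_K1_K3 sequence → Spec_calculate_K1_K3 sequence (calculate_K1_K3 sequence)

-- ===== LEMMAS AND PROOFS =====

-- evaluate the insertion chain of ofList once: the 64 keys are distinct, so ofList is the literal list
set_option maxRecDepth 8000 in
theorem pvDict3_eq : pvDictNum3 = PySem.Dict.mk pvList3 := by decide

-- append-in-a-loop is map
theorem pv_foldl_append {α : Type} (f : α → Int) :
    ∀ (l : List α) (acc : List Int),
      l.foldl (fun X s => X ++ [f s]) acc = acc ++ l.map f := by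
  intro l
  induction l with
  | nil => simp
  | cons a t ih => intro acc; simp [List.foldl_cons, ih]

-- the trigram table agrees with the base-4 closed form on ACGT windows
theorem pv_tri (l : List Char) (h : ∀ c ∈ l, c = 'A' ∨ c = 'T' ∨ c = 'C' ∨ c = 'G') :
    (List.range (l.length - 2)).map
        (fun i => PySem.Dict.getD pvDictNum3 (String.ofList ((l.drop i).take 3)) 0)
      = ((l.zip (l.drop 1)).zip (l.drop 2)).map
          (fun p => 16 * pvDigit p.1.1 + 4 * pvDigit p.1.2 + pvDigit p.2 + 1) := by
  match l, h with
  | [], _ => simp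
  | [a], _ => simp
  | [a, b], _ => simp
  | a :: b :: c :: t, h =>
    have ha := h a (by simp)
    have hb := h b (by simp)
    have hc := h c (by simp)
    have ht : ∀ x ∈ b :: c :: t, x = 'A' ∨ x = 'T' ∨ x = 'C' ∨ x = 'G' := by
      intro x hx; exact h x (by simp at hx ⊢; tauto)
    have ih := pv_tri (b :: c :: t) ht
    have hlen : (a :: b :: c :: t).length - 2 = t.length + 1 := by simp
    rw [hlen, List.range_succ_eq_map, List.map_cons, List.map_map]
    have hhead :
        PySem.Dict.getD pvDictNum3 (String.ofList (((a :: b :: c :: t).drop 0).take 3)) 0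
          = 16 * pvDigit a + 4 * pvDigit b + pvDigit c + 1 := by
      have h3 : ((a :: b :: c :: t).drop 0).take 3 = [a, b, c] := by
        simp [List.take_succ_cons]
      rw [h3, pvDict3_eq]
      rcases ha with rfl | rfl | rfl | rfl <;>
        rcases hb with rfl | rfl | rfl | rfl <;>
          rcases hc with rfl | rfl | rfl | rfl <;> decide
    have htail :
        (List.range t.length).map
            ((fun i => PySem.Dict.getD pvDictNum3 (String.ofList (((a :: b :: c :: t).drop i).take 3)) 0)
              ∘ Nat.succ)
          = (List.range ((b :: c :: t).length - 2)).map
              (fun i => PySem.Dict.getD pvDictNum3 (String.ofList (((b :: c :: t).drop i).take 3)) 0) := by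
      simp [Function.comp]
    simp only [hhead, htail, ih]
    simp

-- Bool-level precondition implies the propositional 4-way disjunction per character
theorem pv_pre_mem (sequence : String) (hp : Pre_calculate_K1_K3 sequence) :
    ∀ c ∈ sequence.toList, c = 'A' ∨ c = 'T' ∨ c = 'C' ∨ c = 'G' := by
  intro c hc
  have h := List.all_eq_true.mp hp c hc
  simp at h
  tauto

theorem calculate_K1_K3_spec' (sequence : String)
    (hp : ∀ c ∈ sequence.toList, c = 'A' ∨ c = 'T' ∨ c = 'C' ∨ c = 'G') :
    calculate_K1_K3 sequence = calculate_K1_K3_alt sequence := by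
  unfold calculate_K1_K3 calculate_K1_K3_alt
  rw [pv_foldl_append, pv_foldl_append, List.nil_append]
  have hslice : ∀ i : Nat,
      PySem.List.slice sequence.toList (some (i : Int)) (some ((i : Int) + 3))
        = (sequence.toList.drop i).take 3 := by
    intro i
    have h3 : ((i : Int) + 3) = ((i : Int) + ((3 : Nat) : Int)) := by norm_num
    rw [h3, PySem.List.slice_natCast_add]
  have hmap1 : sequence.toList.map (fun s => PySem.Dict.getD pvDictNum s 0)
      = sequence.toList.map pvNum := by
    apply List.map_congr_left
    intro c hc
    rcases hp c hc with rfl | rfl | rfl | rfl <;> decide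
  rw [hmap1]
  congr 1
  have hmap2 :
      (List.range (sequence.toList.length - 2)).map
          (fun index : Nat => PySem.Dict.getD pvDictNum3
              (String.ofList (PySem.List.slice sequence.toList (some (index : Int)) (some ((index : Int) + 3)))) 0)
        = (List.range (sequence.toList.length - 2)).map
          (fun i => PySem.Dict.getD pvDictNum3 (String.ofList ((sequence.toList.drop i).take 3)) 0) :=
    List.map_congr_left (fun i _ => by rw [hslice i])
  rw [hmap2, pv_tri sequence.toList hp]

-- ===== VERDICT (by name: the statement is the Claim_ definition above) =====
theorem calculate_K1_K3_spec : Claim_equal_calculate_K1_K3 := by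
  intro sequence _ hp
  exact calculate_K1_K3_spec' sequence (pv_pre_mem sequence hp)
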